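-- pv_equiv track=rewrite | github.com/DozzzeN/SKG | tree_sort/rec_diff.py | recoverData
-- ===== SOURCE A (Python) =====
-- def recoverData(start, diff, ref):
--     rec = []
--     rec.append(start)
--     for i in range(len(diff)):
--         if ref[i + 1] - ref[i] > 0:
--             rec.append(rec[i] + diff[i])
--         else:
--             rec.append(rec[i] - diff[i])
--     return rec
-- ===== SOURCE B (Python) =====
-- def recoverData(start, diff, ref):
--     # Each element computed independently in closed form: rec[i] = start + sum of
--     # signed diffs over j < i, with sign +1 iff ref[j+1] - ref[j] > 0. No accumulator.
--     return [start + sum((1 if ref[j + 1] - ref[j] > 0 else -1) * diff[j]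
--                         for j in range(i))
--             for i in range(len(diff) + 1)]
-- ===== Notes on version B (the rewrite author's own statement) =====
-- stated objective: alternative
-- what changed: B abandons A's sequential accumulation entirely: each output element i is computed independently by a closed-form sum start + sum_{j<i} sign(j)*diff[j] (signs as factors +1/-1), a nested map-over-range with no running state or back-indexing into the result, trading A's O(n) single pass for an O(n^2) stateless formulation.
import Mathlib
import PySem

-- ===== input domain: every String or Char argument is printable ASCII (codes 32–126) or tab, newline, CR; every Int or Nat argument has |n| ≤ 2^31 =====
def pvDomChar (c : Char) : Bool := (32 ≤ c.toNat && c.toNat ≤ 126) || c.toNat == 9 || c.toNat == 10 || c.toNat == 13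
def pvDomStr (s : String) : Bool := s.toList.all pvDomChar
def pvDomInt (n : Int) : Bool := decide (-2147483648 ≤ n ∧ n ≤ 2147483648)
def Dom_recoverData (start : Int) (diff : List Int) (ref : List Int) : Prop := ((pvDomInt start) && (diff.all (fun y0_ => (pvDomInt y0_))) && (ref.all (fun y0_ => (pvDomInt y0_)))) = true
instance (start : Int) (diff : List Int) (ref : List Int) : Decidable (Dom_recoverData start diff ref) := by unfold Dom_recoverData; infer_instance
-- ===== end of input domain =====

-- B computes each output element independently by a closed-form signed sum (no accumulator, no back-indexing); objective: alternative.

-- ===== PORT A =====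
def recoverData (start : Int) (diff : List Int) (ref : List Int) : List Int :=
  (PySem.List.pyRange 0 (diff.length : Int) 1).foldl
    (fun rec i =>
      if PySem.List.pyGetD ref (i + 1) 0 - PySem.List.pyGetD ref i 0 > 0 then
        rec ++ [PySem.List.pyGetD rec i 0 + PySem.List.pyGetD diff i 0]
      else
        rec ++ [PySem.List.pyGetD rec i 0 - PySem.List.pyGetD diff i 0])
    [start]

-- ===== PORT B =====
def recoverData_alt (start : Int) (diff : List Int) (ref : List Int) : List Int :=
  (PySem.List.pyRange 0 ((diff.length : Int) + 1) 1).map (fun i =>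
    start + ((PySem.List.pyRange 0 i 1).map (fun j =>
      (if PySem.List.pyGetD ref (j + 1) 0 - PySem.List.pyGetD ref j 0 > 0 then 1 else -1)
        * PySem.List.pyGetD diff j 0)).sum)

-- ===== PRECONDITION & SPEC =====
-- Pre_ excludes exactly the inputs where the Python A raises IndexError (ref shorter than diff needs).
def Pre_recoverData (start : Int) (diff : List Int) (ref : List Int) : Prop :=
  diff = [] ∨ diff.length + 1 ≤ ref.length
instance (start : Int) (diff : List Int) (ref : List Int) : Decidable (Pre_recoverData start diff ref) := by unfold Pre_recoverData; infer_instance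
def pvWitness_recoverData : Int × List Int × List Int := (5, [2, 3], [0, 1, 0])

def Spec_recoverData (start : Int) (diff : List Int) (ref : List Int) (out : List Int) : Prop := out = recoverData_alt start diff ref
instance (start : Int) (diff : List Int) (ref : List Int) (out : List Int) : Decidable (Spec_recoverData start diff ref out) := by unfold Spec_recoverData; infer_instance

-- ===== CLAIM (what is proved, stated in full; the proofs are below) =====
def Claim_equal_recoverData : Prop := ∀ (start : Int) (diff : List Int) (ref : List Int), Dom_recoverData start diff ref → Pre_recoverData start diff ref → Spec_recoverData start diff ref (recoverData start diff ref)

-- ===== LEMMAS AND PROOFS =====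

-- Signed term j and its prefix sum (the common value both programs compute).
def sgn (diff ref : List Int) (j : Nat) : Int :=
  (if ref.getD (j + 1) 0 - ref.getD j 0 > 0 then 1 else -1) * diff.getD j 0

def psum (diff ref : List Int) : Nat → Int
  | 0 => 0
  | k + 1 => psum diff ref k + sgn diff ref k

-- B's inner sum over range(i) is psum i.
lemma innerSumB (diff ref : List Int) (i : Nat) :
    ((PySem.List.pyRange 0 (i : Int) 1).map (fun j =>
      (if PySem.List.pyGetD ref (j + 1) 0 - PySem.List.pyGetD ref j 0 > 0 then 1 else -1)
        * PySem.List.pyGetD diff j 0)).sum = psum diff ref i := by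
  induction i with
  | zero => simp [psum]
  | succ i ih =>
    have hr : PySem.List.pyRange 0 ((i : Int) + 1) 1
        = PySem.List.pyRange 0 (i : Int) 1 ++ [(i : Int)] :=
      PySem.List.pyRange_one_succ_right (by positivity)
    have hcast : (((i + 1 : Nat)) : Int) = (i : Int) + 1 := by push_cast; ring
    rw [hcast, hr, List.map_append, List.sum_append, ih]
    have h1 : PySem.List.pyGetD ref ((i : Int) + 1) 0 = ref.getD (i + 1) 0 := by
      rw [← hcast, PySem.List.pyGetD_natCast]
    have h0 : PySem.List.pyGetD ref (i : Int) 0 = ref.getD i 0 := PySem.List.pyGetD_natCast ..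
    have hd : PySem.List.pyGetD diff (i : Int) 0 = diff.getD i 0 := PySem.List.pyGetD_natCast ..
    simp [h1, h0, hd, psum, sgn]

-- B equals the closed-form table.
lemma altB (start : Int) (diff ref : List Int) :
    recoverData_alt start diff ref
      = (List.range (diff.length + 1)).map (fun k => start + psum diff ref k) := by
  unfold recoverData_alt
  have hcast : (diff.length : Int) + 1 = ((diff.length + 1 : Nat) : Int) := by push_cast; ring
  rw [hcast, PySem.List.pyRange_one]
  simp only [zero_add, Int.sub_zero, Int.toNat_natCast, List.map_map]
  apply List.map_congr_left
  intro k _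
  simp only [Function.comp]
  rw [innerSumB]

-- A's loop invariant: after processing indices [k, k+m), the result is the table up to k+m.
lemma foldA (diff ref : List Int) (start : Int) : ∀ (m k : Nat), k + m ≤ diff.length →
    (PySem.List.pyRange (k : Int) ((k : Int) + (m : Int)) 1).foldl
      (fun rec i =>
        if PySem.List.pyGetD ref (i + 1) 0 - PySem.List.pyGetD ref i 0 > 0 then
          rec ++ [PySem.List.pyGetD rec i 0 + PySem.List.pyGetD diff i 0]
        else
          rec ++ [PySem.List.pyGetD rec i 0 - PySem.List.pyGetD diff i 0])
      ((List.range (k + 1)).map (fun j => start + psum diff ref j))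
    = (List.range (k + m + 1)).map (fun j => start + psum diff ref j) := by
  intro m
  induction m with
  | zero =>
    intro k _
    rw [PySem.List.pyRange_one_eq_nil (by omega)]
    simp
  | succ m ih =>
    intro k hkm
    have hcons : PySem.List.pyRange (k : Int) ((k : Int) + ((m + 1 : Nat) : Int)) 1
        = (k : Int) :: PySem.List.pyRange ((k : Int) + 1) ((k : Int) + ((m + 1 : Nat) : Int)) 1 :=
      PySem.List.pyRange_one_cons (by push_cast; omega)
    rw [hcons, List.foldl_cons]
    have h1 : PySem.List.pyGetD ref ((k : Int) + 1) 0 = ref.getD (k + 1) 0 := by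
      have : ((k : Int) + 1) = ((k + 1 : Nat) : Int) := by push_cast; ring
      rw [this, PySem.List.pyGetD_natCast]
    have h0 : PySem.List.pyGetD ref (k : Int) 0 = ref.getD k 0 := PySem.List.pyGetD_natCast ..
    have hd : PySem.List.pyGetD diff (k : Int) 0 = diff.getD k 0 := PySem.List.pyGetD_natCast ..
    have hrec : PySem.List.pyGetD ((List.range (k + 1)).map (fun j => start + psum diff ref j)) (k : Int) 0
        = start + psum diff ref k := by
      rw [PySem.List.pyGetD_natCast, List.getD_eq_getElem _ _ (by simp), List.getElem_map,
        List.getElem_range]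
    have hstep : (if PySem.List.pyGetD ref ((k : Int) + 1) 0 - PySem.List.pyGetD ref (k : Int) 0 > 0 then
          (List.range (k + 1)).map (fun j => start + psum diff ref j)
            ++ [PySem.List.pyGetD ((List.range (k + 1)).map (fun j => start + psum diff ref j)) (k : Int) 0
                + PySem.List.pyGetD diff (k : Int) 0]
        else
          (List.range (k + 1)).map (fun j => start + psum diff ref j)
            ++ [PySem.List.pyGetD ((List.range (k + 1)).map (fun j => start + psum diff ref j)) (k : Int) 0
                - PySem.List.pyGetD diff (k : Int) 0])
        = (List.range (k + 1 + 1)).map (fun j => start + psum diff ref j) := by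
      rw [h1, h0, hd, hrec, List.range_succ (n := k + 1), List.map_append]
      have hval : (start + psum diff ref (k + 1))
          = if ref.getD (k + 1) 0 - ref.getD k 0 > 0
            then start + psum diff ref k + diff.getD k 0
            else start + psum diff ref k - diff.getD k 0 := by
        simp only [psum, sgn]; split <;> ring
      simp only [List.map_cons, List.map_nil]
      split_ifs with h
      · rw [hval, if_pos h]
      · rw [hval, if_neg h]
    rw [hstep]
    have hrange : PySem.List.pyRange ((k : Int) + 1) ((k : Int) + ((m + 1 : Nat) : Int)) 1
        = PySem.List.pyRange (((k + 1 : Nat)) : Int) (((k + 1 : Nat) : Int) + (m : Int)) 1 := by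
      congr 1 <;> push_cast <;> ring
    rw [hrange, ih (k + 1) (by omega)]
    congr 2
    omega

-- ===== VERDICT (by name: the statement is the Claim_ definition above) =====
theorem recoverData_spec : Claim_equal_recoverData := by
  intro start diff ref _ _
  show recoverData start diff ref = recoverData_alt start diff ref
  rw [altB]
  unfold recoverData
  have h0 : [start] = (List.range (0 + 1)).map (fun j => start + psum diff ref j) := by
    simp [psum]
  rw [h0]
  have := foldA diff ref start diff.length 0 (by omega)
  simpa using this
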